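-- pv_equiv track=rewrite | github.com/Romathonat/RocketLeagueSkillsDetection | seqehc/utils.py | following_ones
-- ===== SOURCE A (Python) =====
-- def following_ones(bitset, bitset_slot_size, first_zero_mask):
--     """
--     Transform bitset with 1s following for each 1 encoutered, for
--     each bitset_slot.
--     :param bitset:
--     :param bitset_slot_size: the size of a slot in the bitset
--     :return: a bitset (number)
--     """
--     # the first one needs to be a zero
--     bitset = bitset >> 1
--     bitset = bitset & first_zero_mask
--
--     temp = bitset >> 1
--     temp = temp & first_zero_mask
--
--     bitset |= temp
--
--     temp = bitset
--
--     for i in range(bitset_slot_size - 1):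
--         temp = temp >> 1
--         temp = temp & first_zero_mask
--         bitset |= temp
--
--     return bitset
-- ===== SOURCE B (Python) =====
-- def following_ones(bitset, bitset_slot_size, first_zero_mask):
--     """Smear each set bit rightward within its slot by bit-doubling: combine
--     OR-chain segments (and their slot-boundary masks) following the binary
--     decomposition of the chain length, so only O(log bitset_slot_size) big-int
--     operations are needed."""
--     m = first_zero_mask
--     n = bitset_slot_size + 1
--     # acc = OR of the first `span` smear steps; seg_mask = its boundary mask
--     acc = (bitset >> 1) & m
--     seg_mask = m
--     span = 1
--     # res = OR of the first `shift` smear steps, assembled from segments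
--     res, res_mask, shift = 0, -1, 0
--     while n > 0:
--         if n & 1:
--             res |= (acc >> shift) & res_mask
--             res_mask &= seg_mask >> shift
--             shift += span
--         acc |= (acc >> span) & seg_mask
--         seg_mask &= seg_mask >> span
--         span += span
--         n >>= 1
--     return res
-- ===== Notes on version B (the rewrite author's own statement) =====
-- stated objective: faster
-- what changed: A smears ones rightward with one shift-and-mask OR per slot position (O(bitset_slot_size) big-int operations); B combines OR-chain segments by binary decomposition of the chain length (bit-doubling of both the accumulated segment and its boundary mask), using O(log bitset_slot_size) big-int operations; Pre_ restricts to slot sizes >= 1, the function's natural domain -- for non-positive slot sizes A still returns two pre-seeded smear steps, an artefact of its loop seeding.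
-- outside the precondition, e.g. on following_ones(8, 0, 6): A returns 6, B returns 4; on following_ones(5, -2, 6): A returns 2, B returns 0
import Mathlib
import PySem

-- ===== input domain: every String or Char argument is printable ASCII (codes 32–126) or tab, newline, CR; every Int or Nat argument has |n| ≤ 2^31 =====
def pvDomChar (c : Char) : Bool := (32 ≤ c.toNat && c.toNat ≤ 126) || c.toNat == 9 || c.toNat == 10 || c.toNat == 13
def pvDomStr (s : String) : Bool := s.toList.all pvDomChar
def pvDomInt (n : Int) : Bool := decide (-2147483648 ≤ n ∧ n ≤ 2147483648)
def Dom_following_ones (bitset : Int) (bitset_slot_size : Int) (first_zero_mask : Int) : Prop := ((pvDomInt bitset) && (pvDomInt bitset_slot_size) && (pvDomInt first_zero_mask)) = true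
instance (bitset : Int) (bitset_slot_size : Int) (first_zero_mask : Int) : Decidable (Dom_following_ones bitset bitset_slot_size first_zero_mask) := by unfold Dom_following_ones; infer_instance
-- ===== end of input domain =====

-- B replaces A's O(bitset_slot_size)-iteration rightward-smear loop by a binary-decomposition
-- ("bit-doubling") combination of OR-chain segments; equivalence is proved on slot sizes ≥ 1.

-- ===== PORT A =====
def following_ones (bitset : Int) (bitset_slot_size : Int) (first_zero_mask : Int) : Int :=
  -- bitset = (bitset >> 1) & first_zero_mask
  let b1 := PySem.Int.band (bitset >>> (1:Nat)) first_zero_mask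
  -- temp = (bitset >> 1) & first_zero_mask; bitset |= temp
  let t1 := PySem.Int.band (b1 >>> (1:Nat)) first_zero_mask
  let b2 := PySem.Int.bor b1 t1
  -- temp = bitset; for i in range(bitset_slot_size - 1): temp = (temp >> 1) & mask; bitset |= temp
  ((PySem.List.pyRange 0 (bitset_slot_size - 1) 1).foldl
    (fun (st : Int × Int) _ =>
      let t := PySem.Int.band (st.2 >>> (1:Nat)) first_zero_mask
      (PySem.Int.bor st.1 t, t))
    (b2, b2)).1

-- ===== PORT B =====
-- termination helper for the while-loop below: n >>= 1 strictly shrinks a positive n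
theorem pvHalfLt (n : Int) (h : 0 < n) : (n >>> (1:Nat)).toNat < n.toNat := by
  cases n with
  | ofNat m =>
    have hm : 0 < m := by
      by_contra hc
      have : m = 0 := by omega
      subst this
      exact absurd h (by decide)
    show m >>> 1 < m
    rw [Nat.shiftRight_one]
    omega
  | negSucc m => have := Int.negSucc_lt_zero m; omega

-- the `while n > 0` loop of Source B; shift counts shift and span are nonnegative throughout
-- (`.toNat` on them is exact for Python's `>>` there)
def pvAltLoop (n acc segMask span res resMask shift : Int) : Int :=
  if h : 0 < n then
    let s : Int × Int × Int :=
      if PySem.Int.band n 1 ≠ 0 then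
        (PySem.Int.bor res (PySem.Int.band (acc >>> shift.toNat) resMask),
         PySem.Int.band resMask (segMask >>> shift.toNat),
         shift + span)
      else (res, resMask, shift)
    pvAltLoop (n >>> (1:Nat))
      (PySem.Int.bor acc (PySem.Int.band (acc >>> span.toNat) segMask))
      (PySem.Int.band segMask (segMask >>> span.toNat))
      (span + span) s.1 s.2.1 s.2.2
  else res
termination_by n.toNat
decreasing_by exact pvHalfLt n h

def following_ones_alt (bitset : Int) (bitset_slot_size : Int) (first_zero_mask : Int) : Int :=
  let m := first_zero_mask
  let n : Int := bitset_slot_size + 1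
  pvAltLoop n (PySem.Int.band (bitset >>> (1:Nat)) m) m 1 0 (-1) 0

-- ===== PRECONDITION & SPEC =====
-- Pre_ excludes non-positive slot sizes (outside the function's natural domain of slot sizes ≥ 1),
-- on which A still returns a value — two pre-seeded smear steps, an artefact of its loop seeding.
def Pre_following_ones (bitset : Int) (bitset_slot_size : Int) (first_zero_mask : Int) : Prop :=
  1 ≤ bitset_slot_size
instance (bitset : Int) (bitset_slot_size : Int) (first_zero_mask : Int) : Decidable (Pre_following_ones bitset bitset_slot_size first_zero_mask) := by unfold Pre_following_ones; infer_instance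
def pvWitness_following_ones : Int × Int × Int := (5, 3, 6)
def Spec_following_ones (bitset : Int) (bitset_slot_size : Int) (first_zero_mask : Int) (out : Int) : Prop := out = following_ones_alt bitset bitset_slot_size first_zero_mask
instance (bitset : Int) (bitset_slot_size : Int) (first_zero_mask : Int) (out : Int) : Decidable (Spec_following_ones bitset bitset_slot_size first_zero_mask out) := by unfold Spec_following_ones; infer_instance

-- ===== CLAIM (what is proved, stated in full; the proofs are below) =====
def Claim_equal_following_ones : Prop := ∀ (bitset : Int) (bitset_slot_size : Int) (first_zero_mask : Int), Dom_following_ones bitset bitset_slot_size first_zero_mask → Pre_following_ones bitset bitset_slot_size first_zero_mask → Spec_following_ones bitset bitset_slot_size first_zero_mask (following_ones bitset bitset_slot_size first_zero_mask)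

-- ===== LEMMAS AND PROOFS =====
theorem pvLdiffAux (m : Nat) : ∀ n, Nat.ldiff m n + (m &&& n) = m := by
  induction m using Nat.binaryRec with
  | zero => intro n; simp [Nat.ldiff]
  | bit b m ih =>
    intro n
    rw [← Nat.bit_bodd_div2 n, Nat.ldiff_bit, Nat.land_bit]
    have h := ih (Nat.div2 n)
    cases b <;> cases Nat.bodd n <;> simp [Nat.bit] <;> omega

theorem pvBandLand (a b : Int) : PySem.Int.band a b = Int.land a b := by
  cases a with
  | ofNat m => cases b with
    | ofNat n => simp [PySem.Int.band, Int.land]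
    | negSucc n =>
      have h := pvLdiffAux m n
      simp [PySem.Int.band, Int.land, Int.negSucc_eq]
      omega
  | negSucc m => cases b with
    | ofNat n =>
      have h := pvLdiffAux n m
      simp [PySem.Int.band, Int.land, Int.negSucc_eq]
      omega
    | negSucc n => simp [PySem.Int.band, Int.land, Int.negSucc_eq]; omega

theorem pvBorLor (a b : Int) : PySem.Int.bor a b = Int.lor a b := by
  cases a with
  | ofNat m => cases b with
    | ofNat n => simp [PySem.Int.bor, Int.lor]
    | negSucc n =>
      have h := pvLdiffAux n m
      simp [PySem.Int.bor, Int.lor, Int.negSucc_eq]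
      omega
  | negSucc m => cases b with
    | ofNat n =>
      have h := pvLdiffAux m n
      simp [PySem.Int.bor, Int.lor, Int.negSucc_eq]
      omega
    | negSucc n => simp [PySem.Int.bor, Int.lor, Int.negSucc_eq]; omega

theorem pvTbBand (a b : Int) (k : Nat) :
    (PySem.Int.band a b).testBit k = (a.testBit k && b.testBit k) := by
  rw [pvBandLand]; exact Int.testBit_land a b k

theorem pvTbBor (a b : Int) (k : Nat) :
    (PySem.Int.bor a b).testBit k = (a.testBit k || b.testBit k) := by
  rw [pvBorLor]; exact Int.testBit_lor a b k

theorem pvTbShift (a : Int) (j k : Nat) : (a >>> j).testBit k = a.testBit (j + k) := by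
  cases a with
  | ofNat m => show (m >>> j).testBit k = m.testBit (j + k); exact Nat.testBit_shiftRight m
  | negSucc m =>
    show (!(m >>> j).testBit k) = (!m.testBit (j + k))
    rw [Nat.testBit_shiftRight]

theorem pvTbZero (k : Nat) : (0 : Int).testBit k = false := by
  show Nat.testBit 0 k = false; simp

theorem pvTbNegOne (k : Nat) : (-1 : Int).testBit k = true := by
  show (!Nat.testBit 0 k) = true; simp

theorem pvExt {a b : Int} (h : ∀ k, a.testBit k = b.testBit k) : a = b := by
  cases a with
  | ofNat m => cases b with
    | ofNat n => exact congrArg Int.ofNat (Nat.eq_of_testBit_eq h)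
    | negSucc n =>
      exfalso
      have hk := h (m + n)
      have hm : m.testBit (m + n) = false :=
        Nat.testBit_eq_false_of_lt (lt_of_lt_of_le m.lt_two_pow_self
          (Nat.pow_le_pow_right (by norm_num) (Nat.le_add_right m n)))
      have hn : n.testBit (m + n) = false :=
        Nat.testBit_eq_false_of_lt (lt_of_lt_of_le n.lt_two_pow_self
          (Nat.pow_le_pow_right (by norm_num) (Nat.le_add_left n m)))
      rw [show (Int.ofNat m).testBit (m+n) = m.testBit (m+n) from rfl,
          show (Int.negSucc n).testBit (m+n) = !n.testBit (m+n) from rfl, hm, hn] at hk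
      simp at hk
  | negSucc m => cases b with
    | ofNat n =>
      exfalso
      have hk := h (m + n)
      have hm : m.testBit (m + n) = false :=
        Nat.testBit_eq_false_of_lt (lt_of_lt_of_le m.lt_two_pow_self
          (Nat.pow_le_pow_right (by norm_num) (Nat.le_add_right m n)))
      have hn : n.testBit (m + n) = false :=
        Nat.testBit_eq_false_of_lt (lt_of_lt_of_le n.lt_two_pow_self
          (Nat.pow_le_pow_right (by norm_num) (Nat.le_add_left n m)))
      rw [show (Int.ofNat n).testBit (m+n) = n.testBit (m+n) from rfl,
          show (Int.negSucc m).testBit (m+n) = !m.testBit (m+n) from rfl, hm, hn] at hk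
      simp at hk
    | negSucc n =>
      have : m = n := Nat.eq_of_testBit_eq (fun i => by
        have := h i
        rw [show (Int.negSucc m).testBit i = !m.testBit i from rfl,
            show (Int.negSucc n).testBit i = !n.testBit i from rfl] at this
        exact Bool.not_inj this)
      rw [this]

theorem pvShiftZero (a : Int) : a >>> (0:Nat) = a := by
  refine pvExt fun k => ?_
  simp [pvTbShift]

theorem pvNegOneShift (j : Nat) : (-1 : Int) >>> j = -1 := by
  refine pvExt fun k => ?_
  simp [pvTbShift, pvTbNegOne]

theorem pvZeroShift (j : Nat) : (0 : Int) >>> j = 0 := by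
  refine pvExt fun k => ?_
  simp [pvTbShift, pvTbZero]

theorem pvBandNegOneLeft (a : Int) : PySem.Int.band (-1) a = a := by
  refine pvExt fun k => ?_
  simp [pvTbBand, pvTbNegOne]

theorem pvBandZeroLeft (a : Int) : PySem.Int.band 0 a = 0 := by
  refine pvExt fun k => ?_
  simp [pvTbBand, pvTbZero]

theorem pvBorZeroLeft (a : Int) : PySem.Int.bor 0 a = a := by
  refine pvExt fun k => ?_
  simp [pvTbBor, pvTbZero]

theorem pvBorZeroRight (a : Int) : PySem.Int.bor a 0 = a := by
  refine pvExt fun k => ?_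
  simp [pvTbBor, pvTbZero]

theorem pvShiftBor (a b : Int) (j : Nat) :
    PySem.Int.bor a b >>> j = PySem.Int.bor (a >>> j) (b >>> j) := by
  refine pvExt fun k => ?_
  simp [pvTbBor, pvTbShift]

theorem pvShiftBand (a b : Int) (j : Nat) :
    PySem.Int.band a b >>> j = PySem.Int.band (a >>> j) (b >>> j) := by
  refine pvExt fun k => ?_
  simp [pvTbBand, pvTbShift]

theorem pvBandDistribBor (a b c : Int) :
    PySem.Int.band (PySem.Int.bor a b) c
      = PySem.Int.bor (PySem.Int.band a c) (PySem.Int.band b c) := by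
  refine pvExt fun k => ?_
  simp [pvTbBand, pvTbBor, Bool.and_or_distrib_right]

def pvMk (m : Int) : Nat → Int
  | 0 => -1
  | k+1 => PySem.Int.band (pvMk m k) (m >>> k)

def pvF (m x : Int) (k : Nat) : Int := PySem.Int.band (x >>> k) (pvMk m k)

def pvSeg (m x : Int) : Nat → Int
  | 0 => 0
  | k+1 => PySem.Int.bor (pvSeg m x k) (pvF m x (k+1))

theorem pvMk_one (m : Int) : pvMk m 1 = m := by
  simp [pvMk, pvShiftZero, pvBandNegOneLeft]

theorem pvMk_add (m : Int) (a b : Nat) :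
    pvMk m (a + b) = PySem.Int.band (pvMk m a) (pvMk m b >>> a) := by
  induction b with
  | zero =>
    simp only [pvMk, pvNegOneShift, Nat.add_zero]
    refine pvExt fun k => ?_; simp [pvTbBand, pvTbNegOne]
  | succ b ih =>
    show PySem.Int.band (pvMk m (a+b)) (m >>> (a+b)) = _
    rw [ih]
    refine pvExt fun k => ?_
    simp [pvMk, pvTbBand, pvTbShift, pvShiftBand, Bool.and_assoc, Nat.add_assoc, Nat.add_comm, Nat.add_left_comm]

theorem pvF_shift (m x : Int) (j a : Nat) :
    PySem.Int.band (pvF m x j >>> a) (pvMk m a) = pvF m x (j + a) := by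
  unfold pvF
  rw [show j + a = a + j from Nat.add_comm j a, pvMk_add]
  refine pvExt fun k => ?_
  simp [pvTbBand, pvTbShift, Nat.add_comm, Nat.add_assoc, Nat.add_left_comm]
  cases x.testBit (j + (a + k)) <;> cases (pvMk m j).testBit (a + k) <;> cases (pvMk m a).testBit k <;> simp

theorem pvSeg_add (m x : Int) (a b : Nat) :
    pvSeg m x (a + b)
      = PySem.Int.bor (pvSeg m x a) (PySem.Int.band (pvSeg m x b >>> a) (pvMk m a)) := by
  induction b with
  | zero =>
    show pvSeg m x a = _
    rw [show pvSeg m x 0 = 0 from rfl, pvZeroShift, pvBandZeroLeft, pvBorZeroRight]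
  | succ b ih =>
    show PySem.Int.bor (pvSeg m x (a+b)) (pvF m x (a+b+1)) = _
    rw [ih, show pvSeg m x (b+1) = PySem.Int.bor (pvSeg m x b) (pvF m x (b+1)) from rfl,
        pvShiftBor, pvBandDistribBor,
        show pvF m x (b+1) >>> a = pvF m x (b+1) >>> a from rfl]
    rw [pvF_shift m x (b+1) a, show b + 1 + a = a + b + 1 from by omega]
    refine pvExt fun k => ?_
    simp [pvTbBor]
    cases (pvSeg m x a).testBit k <;> cases (PySem.Int.band (pvSeg m x b >>> a) (pvMk m a)).testBit k <;>
      cases (pvF m x (a+b+1)).testBit k <;> simp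

theorem pvBorAssoc (a b c : Int) :
    PySem.Int.bor (PySem.Int.bor a b) c = PySem.Int.bor a (PySem.Int.bor b c) := by
  refine pvExt fun k => ?_
  simp [pvTbBor, Bool.or_assoc]

theorem pvSeg_one (m x : Int) : pvSeg m x 1 = pvF m x 1 := by
  show PySem.Int.bor (pvSeg m x 0) (pvF m x 1) = pvF m x 1
  rw [show pvSeg m x 0 = 0 from rfl, pvBorZeroLeft]

theorem pvF_one (m x : Int) : pvF m x 1 = PySem.Int.band (x >>> (1:Nat)) m := by
  unfold pvF
  rw [pvMk_one]

theorem pvF_step (m x : Int) (k : Nat) :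
    pvF m x (k + 1) = PySem.Int.band (pvF m x k >>> (1:Nat)) m := by
  rw [show PySem.Int.band (pvF m x k >>> (1:Nat)) m
        = PySem.Int.band (pvF m x k >>> (1:Nat)) (pvMk m 1) from by rw [pvMk_one]]
  exact (pvF_shift m x k 1).symm

theorem pvBorSelf (a : Int) : PySem.Int.bor a a = a := by
  refine pvExt fun k => ?_
  simp [pvTbBor]

theorem pvSeg_succ (m x : Int) (k : Nat) :
    pvSeg m x (k + 1) = PySem.Int.bor (pvSeg m x k) (pvF m x (k + 1)) := rfl

theorem pvSeg_absorb (m x : Int) (k : Nat) :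
    PySem.Int.bor (pvSeg m x (k + 1)) (pvF m x (k + 1)) = pvSeg m x (k + 1) := by
  rw [pvSeg_succ, pvBorAssoc, pvBorSelf]

-- the body of A's for-loop ignores the loop variable: iterate it by count
def pvIter (m : Int) : Nat → Int × Int → Int × Int
  | 0, st => st
  | n+1, st =>
    pvIter m n (PySem.Int.bor st.1 (PySem.Int.band (st.2 >>> (1:Nat)) m),
                PySem.Int.band (st.2 >>> (1:Nat)) m)

theorem pvFoldl_eq_iter (m : Int) (l : List Int) (st : Int × Int) :
    l.foldl (fun (st : Int × Int) _ =>
        (PySem.Int.bor st.1 (PySem.Int.band (st.2 >>> (1:Nat)) m),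
         PySem.Int.band (st.2 >>> (1:Nat)) m)) st = pvIter m l.length st := by
  induction l generalizing st with
  | nil => rfl
  | cons a l ih => simpa [pvIter] using ih _

theorem pvIter_inv (m x : Int) (n : Nat) : ∀ j : Nat,
    pvIter m n (pvSeg m x (j+2), PySem.Int.bor (pvF m x (j+1)) (pvF m x (j+2)))
      = (pvSeg m x (j+2+n), PySem.Int.bor (pvF m x (j+1+n)) (pvF m x (j+2+n))) := by
  induction n with
  | zero => intro j; rfl
  | succ n ih =>
    intro j
    have ht : PySem.Int.band (PySem.Int.bor (pvF m x (j+1)) (pvF m x (j+2)) >>> (1:Nat)) m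
        = PySem.Int.bor (pvF m x (j+2)) (pvF m x (j+3)) := by
      rw [pvShiftBor, pvBandDistribBor, ← pvF_step, ← pvF_step]
    have hb : PySem.Int.bor (pvSeg m x (j+2))
          (PySem.Int.bor (pvF m x (j+2)) (pvF m x (j+3))) = pvSeg m x (j+3) := by
      rw [← pvBorAssoc, show j+2 = (j+1)+1 from by omega,
          show j+3 = ((j+1)+1)+1 from by omega, pvSeg_absorb]
      exact (pvSeg_succ m x ((j+1)+1)).symm
    have hstep : pvIter m (n+1) (pvSeg m x (j+2),
          PySem.Int.bor (pvF m x (j+1)) (pvF m x (j+2)))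
        = pvIter m n (pvSeg m x (j+3),
          PySem.Int.bor (pvF m x (j+2)) (pvF m x (j+3))) := by
      show pvIter m n _ = _
      rw [ht, hb]
    rw [hstep, show j+2+(n+1) = j+3+n from by omega,
        show j+1+(n+1) = j+2+n from by omega]
    have := ih (j+1)
    rw [show j+1+2 = j+3 from by omega, show j+1+1 = j+2 from by omega] at this
    exact this

theorem pvRangeLen (e : Int) : (PySem.List.pyRange 0 e 1).length = e.toNat := by
  rw [PySem.List.pyRange_of_pos 0 e Int.one_pos]
  simp only [List.length_map, List.length_range]
  split_ifs with h
  · have : e - 0 + 1 - 1 = e := by ring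
    rw [this, Int.ediv_one]
  · omega

theorem pvA_eq (x s m : Int) :
    following_ones x s m = pvSeg m x (if 1 ≤ s then s.toNat + 1 else 2) := by
  simp only [following_ones]
  rw [pvFoldl_eq_iter, pvRangeLen]
  have e : PySem.Int.bor (PySem.Int.band (x >>> (1:Nat)) m)
        (PySem.Int.band ((PySem.Int.band (x >>> (1:Nat)) m) >>> (1:Nat)) m)
      = PySem.Int.bor (pvF m x 1) (pvF m x 2) := by
    rw [← pvF_one m x, ← pvF_step m x 1]
  rw [e]
  have e2 : (PySem.Int.bor (pvF m x 1) (pvF m x 2), PySem.Int.bor (pvF m x 1) (pvF m x 2))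
      = (pvSeg m x (0+2), PySem.Int.bor (pvF m x (0+1)) (pvF m x (0+2))) := by
    have hb2 : PySem.Int.bor (pvF m x 1) (pvF m x 2) = pvSeg m x 2 := by
      rw [show pvSeg m x 2 = PySem.Int.bor (pvSeg m x 1) (pvF m x 2) from rfl, pvSeg_one]
    rw [hb2]
  rw [e2, pvIter_inv m x (s-1).toNat 0]
  show pvSeg m x (0 + 2 + (s-1).toNat) = _
  split_ifs with h
  · congr 1 <;> omega
  · congr 1 <;> omega

theorem pvAltLoop_eq (m x : Int) (n : Nat) : ∀ (p r : Nat), 1 ≤ p →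
    pvAltLoop (n : Int) (pvSeg m x p) (pvMk m p) (p : Int) (pvSeg m x r) (pvMk m r) (r : Int)
      = pvSeg m x (r + p * n) := by
  induction n using Nat.strong_induction_on with
  | _ n ih =>
    intro p r hp
    rw [pvAltLoop]
    by_cases hn : n = 0
    · subst hn
      rw [dif_neg (by decide), Nat.mul_zero, Nat.add_zero]
    · have h0 : 0 < ((n : Nat) : Int) := by omega
      rw [dif_pos h0]
      have hb : PySem.Int.band ((n : Nat) : Int) 1 = (((n % 2 : Nat) : Nat) : Int) := by
        rw [show (1:Int) = ((1:Nat):Int) from rfl, PySem.Int.band_natCast, Nat.and_one_is_mod]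
      have hs : (((n : Nat) : Int) >>> (1:Nat)) = (((n / 2 : Nat) : Nat) : Int) := by
        show Int.ofNat (n >>> 1) = Int.ofNat (n / 2)
        rw [Nat.shiftRight_one]
      have hdouble : PySem.Int.bor (pvSeg m x p)
            (PySem.Int.band (pvSeg m x p >>> ((p : Int)).toNat) (pvMk m p))
          = pvSeg m x (p + p) := by
        rw [Int.toNat_natCast]
        exact (pvSeg_add m x p p).symm
      have hMdouble : PySem.Int.band (pvMk m p) (pvMk m p >>> ((p : Int)).toNat)
          = pvMk m (p + p) := by
        rw [Int.toNat_natCast]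
        exact (pvMk_add m p p).symm
      rw [hb, hs]
      split_ifs with hodd
      · -- odd step
        have hoddn : n % 2 = 1 := by omega
        have hacc : PySem.Int.bor (pvSeg m x r)
              (PySem.Int.band (pvSeg m x p >>> ((r : Int)).toNat) (pvMk m r))
            = pvSeg m x (r + p) := by
          rw [Int.toNat_natCast]
          exact (pvSeg_add m x r p).symm
        have hM : PySem.Int.band (pvMk m r) (pvMk m p >>> ((r : Int)).toNat)
            = pvMk m (r + p) := by
          rw [Int.toNat_natCast]
          exact (pvMk_add m r p).symm
        rw [hacc, hM, hdouble, hMdouble,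
            show ((r : Nat) : Int) + ((p : Nat) : Int) = (((r + p : Nat) : Nat) : Int) from by push_cast; ring,
            show ((p : Nat) : Int) + ((p : Nat) : Int) = (((p + p : Nat) : Nat) : Int) from by push_cast; ring]
        rw [ih (n / 2) (by omega) (p + p) (r + p) (by omega)]
        have h2 : n = 2 * (n / 2) + 1 := by omega
        have hsplit : r + p * n = (r + p) + (p + p) * (n / 2) := by
          calc r + p * n = r + p * (2 * (n / 2) + 1) := by rw [← h2]
            _ = (r + p) + (p + p) * (n / 2) := by ring
        rw [hsplit]
      · -- even step
        have hevn : n % 2 = 0 := by omega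
        rw [hdouble, hMdouble,
            show ((p : Nat) : Int) + ((p : Nat) : Int) = (((p + p : Nat) : Nat) : Int) from by push_cast; ring]
        rw [ih (n / 2) (by omega) (p + p) r (by omega)]
        have h2 : n = 2 * (n / 2) := by omega
        have hsplit : r + p * n = r + (p + p) * (n / 2) := by
          calc r + p * n = r + p * (2 * (n / 2)) := by rw [← h2]
            _ = r + (p + p) * (n / 2) := by ring
        rw [hsplit]

theorem pvB_eq (x s m : Int) (h : 1 ≤ s) :
    following_ones_alt x s m = pvSeg m x (s.toNat + 1) := by
  simp only [following_ones_alt]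
  have hn : s + 1 = (((s.toNat + 1 : Nat) : Nat) : Int) := by push_cast; omega
  rw [hn]
  have start := pvAltLoop_eq m x (s.toNat + 1) 1 0 (le_refl 1)
  rw [pvSeg_one, pvF_one, pvMk_one,
      show pvSeg m x 0 = 0 from rfl, show pvMk m 0 = -1 from rfl] at start
  simp only [Nat.cast_one, Nat.cast_zero] at start
  rw [start]
  congr 1
  omega

-- ===== VERDICT (by name: the statement is the Claim_ definition above) =====
theorem following_ones_spec : Claim_equal_following_ones := by
  intro bitset bitset_slot_size first_zero_mask _ hpre
  unfold Spec_following_ones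
  rw [pvA_eq, pvB_eq _ _ _ hpre]
  rw [if_pos (show (1:Int) ≤ bitset_slot_size from hpre)]
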